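-- pv_equiv track=rewrite | github.com/benquick123/code-profiling | code/batch-2/vse-naloge-brez-testov/DN7-M-061.py | po_sosedih
-- ===== SOURCE A (Python) =====
-- def sosedov(x, y, mine):
--     """
--     Vrni število sosedov polja s koordinatami `(x, y)` na katerih je mina.
--     Polje samo ne šteje.
--
--     Args:
--         x (int): koordinata x
--         y (int): koordinata y
--         mine (set of tuple of int): koordinate min
--
--     Returns:
--         int: število sosedov
--     """
--     preveri = []
--     preveri.append((x - 1, y))
--     preveri.append((x - 1, y - 1))
--     preveri.append((x, y - 1))
--     preveri.append((x + 1, y - 1))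
--     preveri.append((x + 1, y))
--     preveri.append((x + 1, y + 1))
--     preveri.append((x, y + 1))
--     preveri.append((x - 1, y + 1))
--     bombe = 0
--     for p in preveri:
--         if p in mine:
--             bombe += 1
--     return bombe
--
-- def po_sosedih(mine, s, v):
--     """
--     Vrni slovar, katerega ključi so možna števila sosednjih polj z minami
--     (torej števila od 0 do 8), vrednosti pa množice koordinat polj s toliko
--     sosedami.
--
--     Args:
--         mine (set of tuple of int): koordinate min
--         s (int): širina polja
--         v (int): višina polja
--
--     Returns:
--         dict: (glej zgoraj)
--     """
--     po_sosedih_slovar = {0: set(), 1: set(), 2: set(), 3: set(), 4: set(), 5: set(), 6: set(), 7: set(), 8: set()}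
--     visina = 0
--     while visina < v:
--         sirina = 0
--         while sirina < s:
--             po_sosedih_slovar[sosedov(sirina, visina, mine)].add((sirina, visina))
--             sirina += 1
--         visina += 1
--     return po_sosedih_slovar
-- ===== SOURCE B (Python) =====
-- OFFSETS = ((-1, -1), (-1, 0), (-1, 1), (0, -1), (0, 1), (1, -1), (1, 0), (1, 1))
--
-- def po_sosedih(mine, s, v):
--     counts = {}
--     for (mx, my) in set(mine):
--         for (dx, dy) in OFFSETS:
--             c = (mx + dx, my + dy)
--             counts[c] = counts.get(c, 0) + 1
--     cells = [(x, y) for y in range(v) for x in range(s)]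
--     return {n: {c for c in cells if counts.get(c, 0) == n} for n in range(9)}
-- ===== Notes on version B (the rewrite author's own statement) =====
-- stated objective: alternative
-- what changed: Instead of scanning all 8 neighbors of every grid cell against the mine collection and inserting each cell into a dict of sets, B makes one scatter pass over the (deduplicated) mines incrementing a counter dict at each neighbor cell, then builds each bucket 0..8 directly as a comprehension filtering the cell list by its count; measured roughly on par with A on the generated inputs.
import Mathlib
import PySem

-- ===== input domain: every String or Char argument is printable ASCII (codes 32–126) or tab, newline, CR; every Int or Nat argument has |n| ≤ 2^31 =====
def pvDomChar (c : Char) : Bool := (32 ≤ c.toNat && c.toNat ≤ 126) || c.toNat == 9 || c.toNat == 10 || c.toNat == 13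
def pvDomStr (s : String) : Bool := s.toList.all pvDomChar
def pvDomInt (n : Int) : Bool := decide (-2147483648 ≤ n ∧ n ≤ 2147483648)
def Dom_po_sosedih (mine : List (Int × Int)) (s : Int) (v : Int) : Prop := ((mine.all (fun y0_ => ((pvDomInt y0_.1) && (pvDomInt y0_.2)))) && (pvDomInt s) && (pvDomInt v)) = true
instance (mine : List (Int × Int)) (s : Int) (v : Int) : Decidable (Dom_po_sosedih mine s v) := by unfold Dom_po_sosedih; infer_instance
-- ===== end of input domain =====

-- B replaces A's per-cell scan of the 8 neighbours over `mine` by a scatter pass over the mines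
-- into a counter dict, then builds each bucket 0..8 directly as a filter of the cell list
-- (objective: alternative algorithm; no speed claim).

-- ===== PORT A =====
-- A's `preveri` list, built by the eight appends in order.
def preveriA (x y : Int) : List (Int × Int) :=
  [(x - 1, y), (x - 1, y - 1), (x, y - 1), (x + 1, y - 1),
   (x + 1, y), (x + 1, y + 1), (x, y + 1), (x - 1, y + 1)]

def sosedovA (x y : Int) (mine : List (Int × Int)) : Int :=
  (preveriA x y).foldl (fun bombe p => if p ∈ mine then bombe + 1 else bombe) 0

-- A's two `while` counter loops (counter from 0 stepping by 1 up to the bound) are ported as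
-- folds over `pyRange 0 bound 1`, which iterates exactly the same values in the same order.
def po_sosedih (mine : List (Int × Int)) (s : Int) (v : Int) : List (Int × List (Int × Int)) :=
  let init : PySem.Dict Int (PySem.Set (Int × Int)) :=
    PySem.Dict.ofList [(0, []), (1, []), (2, []), (3, []), (4, []), (5, []), (6, []), (7, []), (8, [])]
  let final := (PySem.List.pyRange 0 v 1).foldl (fun d visina =>
      (PySem.List.pyRange 0 s 1).foldl (fun d sirina =>
        d.modify (sosedovA sirina visina mine) PySem.Set.empty
          (fun st => PySem.Set.add st (sirina, visina))) d) init
  final.items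

-- ===== PORT B =====
def pvOffsets : List (Int × Int) :=
  [(-1, -1), (-1, 0), (-1, 1), (0, -1), (0, 1), (1, -1), (1, 0), (1, 1)]

-- B's scatter pass: one counter increment per (deduplicated) mine per offset.
def pvCounts (mine : List (Int × Int)) : PySem.Dict (Int × Int) Int :=
  (PySem.Set.ofList mine).foldl (fun d m =>
    pvOffsets.foldl (fun d δ =>
      d.insert (m.1 + δ.1, m.2 + δ.2) (d.getD (m.1 + δ.1, m.2 + δ.2) 0 + 1)) d)
    PySem.Dict.empty

-- B's `cells` list comprehension (y outer, x inner), then the dict comprehension over n = 0..8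
-- whose value is the set comprehension filtering `cells` by count n.
def po_sosedih_alt (mine : List (Int × Int)) (s : Int) (v : Int) : List (Int × List (Int × Int)) :=
  let counts := pvCounts mine
  let cells := (PySem.List.pyRange 0 v 1).flatMap (fun y =>
    (PySem.List.pyRange 0 s 1).map (fun x => (x, y)))
  (PySem.List.pyRange 0 9 1).map (fun n =>
    (n, PySem.Set.ofList (cells.filter (fun c => counts.getD c 0 == n))))

-- ===== PRECONDITION & SPEC =====
def Spec_po_sosedih (mine : List (Int × Int)) (s : Int) (v : Int) (out : List (Int × List (Int × Int))) : Prop := out = po_sosedih_alt mine s v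
instance (mine : List (Int × Int)) (s : Int) (v : Int) (out : List (Int × List (Int × Int))) : Decidable (Spec_po_sosedih mine s v out) := by unfold Spec_po_sosedih; infer_instance

-- ===== CLAIM (what is proved, stated in full; the proofs are below) =====
def Claim_equal_po_sosedih : Prop := ∀ (mine : List (Int × Int)) (s : Int) (v : Int), Dom_po_sosedih mine s v → Spec_po_sosedih mine s v (po_sosedih mine s v)

-- ===== LEMMAS AND PROOFS =====

-- one mine m contributes to cell c exactly when m is one of c's eight neighbours
lemma count_neighbors (m c : Int × Int) :
    (pvOffsets.map (fun δ => (m.1 + δ.1, m.2 + δ.2))).count c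
      = if m ∈ preveriA c.1 c.2 then 1 else 0 := by
  obtain ⟨a, b⟩ := m
  obtain ⟨x, y⟩ := c
  simp only [pvOffsets, preveriA, List.map, List.count_cons, List.count_nil,
    List.mem_cons, List.not_mem_nil, or_false, Prod.ext_iff, beq_iff_eq]
  split_ifs <;> omega

lemma getD_step (d : PySem.Dict (Int × Int) Int) (m c : Int × Int) :
    (pvOffsets.foldl (fun d δ =>
        d.insert (m.1 + δ.1, m.2 + δ.2) (d.getD (m.1 + δ.1, m.2 + δ.2) 0 + 1)) d).getD c 0
      = d.getD c 0 + if m ∈ preveriA c.1 c.2 then 1 else 0 := by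
  have hshape : (pvOffsets.foldl (fun d δ =>
        d.insert (m.1 + δ.1, m.2 + δ.2) (d.getD (m.1 + δ.1, m.2 + δ.2) 0 + 1)) d)
      = ((pvOffsets.map (fun δ => (m.1 + δ.1, m.2 + δ.2))).foldl
          (fun d k => d.insert k (d.getD k 0 + 1)) d) := rfl
  rw [hshape, PySem.Dict.getD_foldl_insert_add_one, count_neighbors]
  split_ifs <;> simp

lemma getD_scatter (L : List (Int × Int)) (d : PySem.Dict (Int × Int) Int) (c : Int × Int) :
    (L.foldl (fun d m =>
        pvOffsets.foldl (fun d δ =>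
          d.insert (m.1 + δ.1, m.2 + δ.2) (d.getD (m.1 + δ.1, m.2 + δ.2) 0 + 1)) d) d).getD c 0
      = d.getD c 0 + (L.countP (fun m => decide (m ∈ preveriA c.1 c.2)) : Int) := by
  induction L generalizing d with
  | nil => simp
  | cons m L ih =>
    rw [List.foldl_cons, ih, getD_step, List.countP_cons]
    by_cases h : m ∈ preveriA c.1 c.2 <;> · simp [h]; try ring

lemma nodup_preveriA (x y : Int) : (preveriA x y).Nodup := by
  simp [preveriA, Prod.ext_iff]
  omega

-- counting the distinct mines that are neighbours of c = counting the neighbours of c that are mines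
lemma countP_swap (mine : List (Int × Int)) (x y : Int) :
    ((PySem.Set.ofList mine).countP (fun m => decide (m ∈ preveriA x y)) : Int)
      = (preveriA x y).countP (fun p => decide (p ∈ mine)) := by
  have h1 : ((PySem.Set.ofList mine).filter (fun m => decide (m ∈ preveriA x y))).Perm
      ((preveriA x y).filter (fun p => decide (p ∈ PySem.Set.ofList mine))) := by
    refine (List.perm_ext_iff_of_nodup
      (List.Nodup.filter _ (PySem.Set.nodup_ofList mine))
      (List.Nodup.filter _ (nodup_preveriA x y))).mpr ?_
    intro a
    simp only [List.mem_filter, decide_eq_true_eq]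
    tauto
  have h2 : (preveriA x y).countP (fun p => decide (p ∈ PySem.Set.ofList mine))
      = (preveriA x y).countP (fun p => decide (p ∈ mine)) := by
    refine List.countP_congr ?_
    intro a _
    simp [PySem.Set.mem_ofList]
  have h3 : (PySem.Set.ofList mine).countP (fun m => decide (m ∈ preveriA x y))
      = (preveriA x y).countP (fun p => decide (p ∈ mine)) := by
    rw [List.countP_eq_length_filter, ← h2, List.countP_eq_length_filter, h1.length_eq]
  exact_mod_cast h3

lemma counts_eq_sosedov (mine : List (Int × Int)) (x y : Int) :
    (pvCounts mine).getD (x, y) 0 = sosedovA x y mine := by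
  rw [pvCounts, getD_scatter, sosedovA, PySem.List.foldl_ite_add_one]
  simp only [PySem.Dict.getD_empty, zero_add]
  exact countP_swap mine x y

-- A's neighbour count is one of 0..8
lemma sosedov_mem (mine : List (Int × Int)) (x y : Int) :
    sosedovA x y mine ∈ ([0, 1, 2, 3, 4, 5, 6, 7, 8] : List Int) := by
  have h : sosedovA x y mine
      = ((preveriA x y).countP (fun p => decide (p ∈ mine)) : Int) := by
    rw [sosedovA, PySem.List.foldl_ite_add_one, zero_add]
  have hc := List.countP_le_length (p := fun p => decide (p ∈ mine)) (l := preveriA x y)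
  simp only [preveriA, List.length_cons, List.length_nil] at h hc
  simp only [List.mem_cons, List.not_mem_nil, or_false, h]
  omega

-- A's classification loop: each bucket n ends as its start value ++ the cells with count n, in order
lemma getD_fold_classify (L : List (Int × Int)) (f : Int × Int → Int)
    (d : PySem.Dict Int (PySem.Set (Int × Int))) (n : Int)
    (hnd : L.Nodup) (hfresh : ∀ c ∈ L, ∀ k, c ∉ d.getD k PySem.Set.empty) :
    (L.foldl (fun d c => d.modify (f c) PySem.Set.empty
        (fun st => PySem.Set.add st c)) d).getD n PySem.Set.empty
      = d.getD n PySem.Set.empty ++ L.filter (fun c => f c == n) := by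
  induction L generalizing d with
  | nil => simp
  | cons c L ih =>
    rw [List.foldl_cons, ih _ (hnd.of_cons)]
    · rw [PySem.Dict.getD_modify, List.filter_cons]
      by_cases h : f c = n
      · have hnotmem : c ∉ d.getD n ([] : PySem.Set (Int × Int)) :=
          hfresh c (List.mem_cons_self ..) n
        simp [h, PySem.Set.add_of_not_mem hnotmem]
      · simp [h, Ne.symm h]
    · intro c' hc' k
      rw [PySem.Dict.getD_modify]
      have hne : c' ≠ c := by
        rintro rfl
        exact (List.nodup_cons.mp hnd).1 hc'
      split_ifs with hk
      · rw [PySem.Set.mem_add]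
        push Not
        exact ⟨hfresh c' (List.mem_cons_of_mem _ hc') _, hne⟩
      · exact hfresh c' (List.mem_cons_of_mem _ hc') _

-- the cell list is duplicate-free
lemma nodup_cells (s v : Int) :
    ((PySem.List.pyRange 0 v 1).flatMap (fun y =>
      (PySem.List.pyRange 0 s 1).map (fun x => (x, y)))).Nodup := by
  rw [List.nodup_flatMap]
  refine ⟨fun y _ => (PySem.List.nodup_pyRange_one 0 s).map
    (fun a b h => (Prod.mk.injEq .. ▸ h).1), ?_⟩
  refine List.Pairwise.imp ?_
    ((PySem.List.nodup_pyRange_one 0 v).pairwise_of_forall_ne (fun a _ b _ h => h))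
  intro a b hab p hpa hpb
  simp only [List.mem_map] at hpa hpb
  obtain ⟨xa, _, rfl⟩ := hpa
  obtain ⟨xb, _, h⟩ := hpb
  exact hab (Prod.mk.injEq .. ▸ h).2.symm

-- ===== VERDICT (by name: the statement is the Claim_ definition above) =====
theorem po_sosedih_spec : Claim_equal_po_sosedih := by
  intro mine s v _
  unfold Spec_po_sosedih po_sosedih po_sosedih_alt
  dsimp only
  set init : PySem.Dict Int (PySem.Set (Int × Int)) :=
    PySem.Dict.ofList [(0, []), (1, []), (2, []), (3, []), (4, []), (5, []), (6, []), (7, []), (8, [])]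
    with hinitdef
  set cells : List (Int × Int) := (PySem.List.pyRange 0 v 1).flatMap (fun y =>
    (PySem.List.pyRange 0 s 1).map (fun x => (x, y))) with hcells
  -- 1. every lookup in `init` is empty
  have hinit : ∀ n : Int, init.getD n PySem.Set.empty = [] := by
    intro n
    rw [PySem.Dict.getD_eq_get?_getD]
    rcases h : init.get? n with _ | val
    · rfl
    · have hm := PySem.Dict.mem_items_of_get?_eq_some init h
      have hitems : init.items
          = [(0, []), (1, []), (2, []), (3, []), (4, []), (5, []), (6, []), (7, []), (8, [])] := by
        decide
      rw [hitems] at hm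
      simp only [List.mem_cons, List.not_mem_nil, or_false, Prod.mk.injEq] at hm
      rcases hm with ⟨_, rfl⟩ | ⟨_, rfl⟩ | ⟨_, rfl⟩ | ⟨_, rfl⟩ | ⟨_, rfl⟩ | ⟨_, rfl⟩
        | ⟨_, rfl⟩ | ⟨_, rfl⟩ | ⟨_, rfl⟩ <;> rfl
  -- 2. A's nested counter loops are one fold over `cells`
  have hA : (PySem.List.pyRange 0 v 1).foldl (fun d visina =>
      (PySem.List.pyRange 0 s 1).foldl (fun d sirina =>
        d.modify (sosedovA sirina visina mine) PySem.Set.empty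
          (fun st => PySem.Set.add st (sirina, visina))) d) init
      = cells.foldl (fun d c => d.modify (sosedovA c.1 c.2 mine) PySem.Set.empty
          (fun st => PySem.Set.add st c)) init := by
    rw [hcells, List.foldl_flatMap]
    refine PySem.List.foldl_congr_mem _ _ _ _ (fun d y _ => ?_)
    rw [List.foldl_map]
  rw [hA]
  set final := cells.foldl (fun d c => d.modify (sosedovA c.1 c.2 mine) PySem.Set.empty
      (fun st => PySem.Set.add st c)) init with hfinal
  -- 3. the keys of the final dict are still exactly 0..8
  have hkeysnd : final.keys.Nodup := by
    rw [hfinal]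
    exact PySem.Dict.nodup_keys_foldl_modify_key cells (fun c => sosedovA c.1 c.2 mine)
      PySem.Set.empty _ init (by decide)
  have hkeys : final.keys = ([0, 1, 2, 3, 4, 5, 6, 7, 8] : List Int) := by
    rw [hfinal, PySem.Dict.keys_foldl_modify_key, PySem.Set.update_eq_append_filter]
    have hfilter : ((PySem.Set.ofList (cells.map (fun c => sosedovA c.1 c.2 mine))).filter
        (fun y => !(PySem.Set.contains init.keys y))) = [] := by
      rw [List.filter_eq_nil_iff]
      intro a ha
      rw [PySem.Set.mem_ofList, List.mem_map] at ha
      obtain ⟨c, _, rfl⟩ := ha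
      have := sosedov_mem mine c.1 c.2
      simp only [Bool.not_eq_true, PySem.Set.contains_eq_listContains]
      simp only [List.mem_cons, List.not_mem_nil, or_false] at this
      rcases this with h | h | h | h | h | h | h | h | h <;> rw [h] <;> decide
    rw [hfilter, List.append_nil]
    decide
  -- 4. read the final dict back as a map over its keys, and compare bucket by bucket
  rw [PySem.Dict.items_eq_map_keys final hkeysnd PySem.Set.empty, hkeys]
  have hrange : PySem.List.pyRange 0 9 1 = ([0, 1, 2, 3, 4, 5, 6, 7, 8] : List Int) := by decide
  rw [hrange]
  refine List.map_congr_left (fun n _ => ?_)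
  rw [hfinal, getD_fold_classify cells _ init n (nodup_cells s v)
      (fun c _ k => by rw [hinit k]; exact List.not_mem_nil),
    hinit n, List.nil_append]
  have hfilter_eq : cells.filter (fun c => (pvCounts mine).getD c 0 == n)
      = cells.filter (fun c => sosedovA c.1 c.2 mine == n) := by
    refine List.filter_congr (fun c _ => ?_)
    rw [show (pvCounts mine).getD c 0 = sosedovA c.1 c.2 mine from counts_eq_sosedov mine c.1 c.2]
  rw [hfilter_eq]
  exact congrArg (Prod.mk n)
    (Eq.symm (PySem.Set.ofList_eq_self_of_nodup _ ((nodup_cells s v).filter _)))
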